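-- pv_equiv track=rewrite | github.com/gilang-anggara/codility-lessons-solution | Lesson 12/CommonPrimeDivisors.py | hasCommonDivisors
-- ===== SOURCE A (Python) =====
-- def gcd(x, y, res):
--     if x == y:
--         return x * res
--     elif x % 2 == 0 and y % 2 == 0:
--         return gcd(x//2, y//2, 2 * res)
--     elif x % 2 == 0:
--         return gcd(x//2, y, res)
--     elif y % 2 == 0:
--         return gcd(x, y//2, res)
--     elif x > y:
--         return gcd(x-y, y, res)
--     else:
--         return gcd(x, y-x, res)
--
-- def hasCommonDivisors(x, y):
--     if x == y:
--         return True
--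
--     z = gcd(x, y, 1)
--
--     if z == 1:
--         return False
--
--     if z == y:
--         return True
--
--     return hasCommonDivisors(z, y//z)
-- ===== SOURCE B (Python) =====
-- def gcd(a, b):
--     while b:
--         a, b = b, a % b
--     return a
--
-- def hasCommonDivisors(x, y):
--     while x != y:
--         z = gcd(x, y)
--         if z == 1:
--             return False
--         if z == y:
--             return True
--         x, y = z, y // z
--     return True
-- ===== Notes on version B (the rewrite author's own statement) =====
-- stated objective: simpler
-- what changed: Replaces A's recursive binary-subtraction gcd (with a res power-of-two accumulator) and recursive reduction by a three-line iterative Euclid gcd (a, b = b, a % b) and a plain while-loop over (x, y).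
-- outside the precondition, e.g. on hasCommonDivisors(-4, -2): A returns True, B returns True; on hasCommonDivisors(-20, -10): A returns True, B returns True
import Mathlib
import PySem

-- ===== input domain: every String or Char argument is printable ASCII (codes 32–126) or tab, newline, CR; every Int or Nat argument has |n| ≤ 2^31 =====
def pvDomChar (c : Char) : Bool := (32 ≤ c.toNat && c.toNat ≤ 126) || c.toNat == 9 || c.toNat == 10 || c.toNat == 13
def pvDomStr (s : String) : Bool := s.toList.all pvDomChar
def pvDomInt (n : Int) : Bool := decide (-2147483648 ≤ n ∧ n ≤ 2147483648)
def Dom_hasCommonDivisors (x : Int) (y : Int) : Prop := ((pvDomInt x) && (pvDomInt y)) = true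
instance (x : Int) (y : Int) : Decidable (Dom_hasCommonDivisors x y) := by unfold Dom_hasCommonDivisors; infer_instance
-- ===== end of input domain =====

-- B replaces A's recursive binary-subtraction gcd and recursive reduction loop by a plain
-- iterative Euclid's algorithm (a, b = b, a % b) and a while-loop: simpler (shorter) code,
-- same return value on all inputs admitted by Pre_.

-- ===== PORT A =====
-- A's recursive binary gcd.  The fuel argument only makes the recursion total in Lean:
-- on every input admitted by Pre_ the fuel (x+y).toNat + 1 cannot run out (proved below),
-- so the port computes exactly what the Python recursion computes there.
def gcdAux (fuel : Nat) (x : Int) (y : Int) (res : Int) : Int :=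
  match fuel with
  | 0 => 0
  | fuel + 1 =>
    if x = y then x * res
    else if PySem.Int.mod x 2 = 0 ∧ PySem.Int.mod y 2 = 0 then
      gcdAux fuel (PySem.Int.floordiv x 2) (PySem.Int.floordiv y 2) (2 * res)
    else if PySem.Int.mod x 2 = 0 then
      gcdAux fuel (PySem.Int.floordiv x 2) y res
    else if PySem.Int.mod y 2 = 0 then
      gcdAux fuel x (PySem.Int.floordiv y 2) res
    else if x > y then
      gcdAux fuel (x - y) y res
    else
      gcdAux fuel x (y - x) res

def gcdA (x : Int) (y : Int) (res : Int) : Int := gcdAux ((x + y).toNat + 1) x y res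

-- A's recursive hasCommonDivisors; fuel y.toNat + 1 suffices on Pre_ (y shrinks by a factor ≥ 2).
def hasCDA (fuel : Nat) (x : Int) (y : Int) : Bool :=
  match fuel with
  | 0 => false
  | fuel + 1 =>
    if x = y then true
    else
      let z := gcdA x y 1
      if z = 1 then false
      else if z = y then true
      else hasCDA fuel z (PySem.Int.floordiv y z)

def hasCommonDivisors (x : Int) (y : Int) : Bool := hasCDA (y.toNat + 1) x y

-- ===== PORT B =====
-- B's iterative Euclid gcd: while b: a, b = b, a % b.  Fuel only guards totality;
-- b.toNat + 1 steps suffice whenever a > 0 and b ≥ 0 (proved below).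
def gcdBLoop (fuel : Nat) (a : Int) (b : Int) : Int :=
  match fuel with
  | 0 => 0
  | fuel + 1 => if b = 0 then a else gcdBLoop fuel b (PySem.Int.mod a b)

def gcdB (a : Int) (b : Int) : Int := gcdBLoop (b.toNat + 1) a b

-- B's while loop: while x != y: z = gcd(x, y); … ; x, y = z, y // z; return True.
def hasCDBLoop (fuel : Nat) (x : Int) (y : Int) : Bool :=
  match fuel with
  | 0 => false
  | fuel + 1 =>
    if x = y then true
    else
      let z := gcdB x y
      if z = 1 then false
      else if z = y then true
      else hasCDBLoop fuel z (PySem.Int.floordiv y z)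

def hasCommonDivisors_alt (x : Int) (y : Int) : Bool := hasCDBLoop (y.toNat + 1) x y

-- ===== PRECONDITION & SPEC =====
-- Pre_ excludes pairs with x ≠ y and a nonpositive component: there A's binary-gcd recursion
-- almost always hits Python's RecursionError, and the rare returns (e.g. (-4, -2) → True) are
-- accidents of the subtraction loop on negatives, which B happens to reproduce anyway.
def Pre_hasCommonDivisors (x : Int) (y : Int) : Prop := x = y ∨ (1 ≤ x ∧ 1 ≤ y)
instance (x : Int) (y : Int) : Decidable (Pre_hasCommonDivisors x y) := by
  unfold Pre_hasCommonDivisors; infer_instance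

def pvWitness_hasCommonDivisors : Int × Int := (2, 4)

def Spec_hasCommonDivisors (x : Int) (y : Int) (out : Bool) : Prop := out = hasCommonDivisors_alt x y
instance (x : Int) (y : Int) (out : Bool) : Decidable (Spec_hasCommonDivisors x y out) := by
  unfold Spec_hasCommonDivisors; infer_instance

-- ===== CLAIM (what is proved, stated in full; the proofs are below) =====
def Claim_equal_hasCommonDivisors : Prop := ∀ (x : Int) (y : Int), Dom_hasCommonDivisors x y → Pre_hasCommonDivisors x y → Spec_hasCommonDivisors x y (hasCommonDivisors x y)

-- ===== LEMMAS AND PROOFS =====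

-- q < a whenever a/b with 0 < a and 1 < b (used for the fuel of the outer loops)
theorem pv_ediv_lt_self (a b : Int) (ha : 0 < a) (hb : 1 < b) : a / b < a := by
  have h0 : b ≠ 0 := by omega
  have hmod : 0 ≤ a % b := Int.emod_nonneg a h0
  have hdm : b * (a / b) + a % b = a := Int.mul_ediv_add_emod a b
  by_cases h : a / b < a
  · exact h
  · exfalso; nlinarith

-- one Euclid step preserves Int.gcd
theorem pv_gcd_step (a b : Int) : Int.gcd a b = Int.gcd b (a % b) := by
  have hdm : b * (a / b) + a % b = a := Int.mul_ediv_add_emod a b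
  apply Nat.dvd_antisymm
  · apply Int.dvd_gcd (Int.gcd_dvd_right a b)
    have : a % b = a - b * (a / b) := by omega
    rw [this]
    exact dvd_sub (Int.gcd_dvd_left a b) (Dvd.dvd.mul_right (Int.gcd_dvd_right a b) _)
  · apply Int.dvd_gcd
    · have h2 : (↑(Int.gcd b (a % b)) : Int) ∣ b * (a / b) + a % b :=
        dvd_add (Dvd.dvd.mul_right (Int.gcd_dvd_left b (a % b)) _) (Int.gcd_dvd_right b (a % b))
      rwa [hdm] at h2
    · exact Int.gcd_dvd_left b (a % b)

theorem pv_gcd_half_half (x y : Int) (hx : 2 ∣ x) (hy : 2 ∣ y) :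
    (Int.gcd x y : Int) = 2 * Int.gcd (x / 2) (y / 2) := by
  have hx2 : 2 * (x / 2) = x := Int.mul_ediv_cancel' hx
  have hy2 : 2 * (y / 2) = y := Int.mul_ediv_cancel' hy
  have := Int.gcd_mul_left 2 (x / 2) (y / 2)
  rw [hx2, hy2] at this
  rw [this]; push_cast; ring

theorem pv_coprime_two (n : Nat) (h : n % 2 = 1) : Nat.Coprime 2 n := by
  unfold Nat.Coprime
  rw [Nat.gcd_rec, h]
  simp

theorem pv_gcd_half_left (x y : Int) (hx : 2 ∣ x) (hy : ¬ 2 ∣ y) :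
    Int.gcd (x / 2) y = Int.gcd x y := by
  have hx2 : 2 * (x / 2) = x := Int.mul_ediv_cancel' hx
  have hyodd : y.natAbs % 2 = 1 := by omega
  have hcop : Nat.Coprime 2 y.natAbs := pv_coprime_two _ hyodd
  have habs : x.natAbs = 2 * (x / 2).natAbs := by omega
  rw [Int.gcd_def x y, habs, Nat.gcd_mul_right_left_of_gcd_eq_one hcop, ← Int.gcd_def]

-- A's binary gcd computes Int.gcd x y * res on positive inputs (fuel x+y suffices)
theorem gcdAux_eq (fuel : Nat) : ∀ (x y res : Int), 0 < x → 0 < y → (x + y).toNat ≤ fuel →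
    gcdAux fuel x y res = (Int.gcd x y : Int) * res := by
  induction fuel with
  | zero => intro x y res hx hy hf; omega
  | succ fuel ih =>
    intro x y res hx hy hf
    have h2 : (0:Int) < 2 := by omega
    simp only [gcdAux, PySem.Int.mod_eq_zero_iff_dvd]
    by_cases hxy : x = y
    · subst hxy
      simp [Int.gcd_self, Int.natAbs_of_nonneg hx.le]
    · simp only [if_neg hxy]
      rw [PySem.Int.floordiv_eq_ediv_of_pos h2, PySem.Int.floordiv_eq_ediv_of_pos h2]
      by_cases hx2 : 2 ∣ x
      · by_cases hy2 : 2 ∣ y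
        · simp only [if_pos (⟨hx2, hy2⟩ : (2:Int) ∣ x ∧ (2:Int) ∣ y)]
          rw [ih (x / 2) (y / 2) (2 * res) (by omega) (by omega) (by omega)]
          rw [show ((Int.gcd x y : Int)) = 2 * Int.gcd (x / 2) (y / 2) from pv_gcd_half_half x y hx2 hy2]
          ring
        · simp only [if_neg (by tauto : ¬ (2 ∣ x ∧ 2 ∣ y)), if_pos hx2]
          rw [ih (x / 2) y res (by omega) hy (by omega), pv_gcd_half_left x y hx2 hy2]
      · by_cases hy2 : 2 ∣ y
        · simp only [if_neg (by tauto : ¬ (2 ∣ x ∧ 2 ∣ y)), if_neg hx2, if_pos hy2]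
          rw [ih x (y / 2) res hx (by omega) (by omega)]
          rw [Int.gcd_comm x (y / 2), pv_gcd_half_left y x hy2 hx2, Int.gcd_comm y x]
        · simp only [if_neg (by tauto : ¬ (2 ∣ x ∧ 2 ∣ y)), if_neg hx2, if_neg hy2]
          by_cases hgt : x > y
          · simp only [if_pos hgt]
            rw [ih (x - y) y res (by omega) hy (by omega), Int.gcd_sub_self_left y x]
          · simp only [if_neg hgt]
            rw [ih x (y - x) res hx (by omega) (by omega), Int.gcd_sub_self_right x y]

theorem gcdA_eq (x y : Int) (hx : 0 < x) (hy : 0 < y) : gcdA x y 1 = (Int.gcd x y : Int) := by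
  rw [gcdA, gcdAux_eq ((x + y).toNat + 1) x y 1 hx hy (by omega)]
  ring

-- B's Euclid loop computes Int.gcd (fuel b suffices when a > 0, b ≥ 0)
theorem gcdBLoop_eq (fuel : Nat) : ∀ (a b : Int), 0 < a → 0 ≤ b → b.toNat < fuel →
    gcdBLoop fuel a b = (Int.gcd a b : Int) := by
  induction fuel with
  | zero => intro a b ha hb hf; omega
  | succ fuel ih =>
    intro a b ha hb hf
    simp only [gcdBLoop]
    by_cases hb0 : b = 0
    · subst hb0
      simp [Int.natAbs_of_nonneg ha.le]
    · have hbpos : 0 < b := by omega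
      rw [if_neg hb0, PySem.Int.mod_eq_emod_of_pos hbpos]
      have hmn : 0 ≤ a % b := Int.emod_nonneg a hb0
      have hml : a % b < b := Int.emod_lt_of_pos a hbpos
      rw [ih b (a % b) hbpos hmn (by omega)]
      rw [← pv_gcd_step a b]

theorem gcdB_eq (x y : Int) (hx : 0 < x) (hy : 0 < y) : gcdB x y = (Int.gcd x y : Int) := by
  exact gcdBLoop_eq (y.toNat + 1) x y hx hy.le (by omega)

-- the two outer loops agree step for step once the gcds agree
theorem hasCD_eq (fuel : Nat) : ∀ (x y : Int), Pre_hasCommonDivisors x y → y.toNat < fuel →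
    hasCDA fuel x y = hasCDBLoop fuel x y := by
  induction fuel with
  | zero => intro x y _ hf; omega
  | succ fuel ih =>
    intro x y hpre hf
    simp only [hasCDA, hasCDBLoop]
    by_cases hxy : x = y
    · simp [hxy]
    · rcases hpre with h | ⟨hx, hy⟩
      · exact absurd h hxy
      have hxp : 0 < x := by omega
      have hyp : 0 < y := by omega
      rw [if_neg hxy, if_neg hxy, gcdA_eq x y hxp hyp, gcdB_eq x y hxp hyp]
      set g : Int := (Int.gcd x y : Int) with hg
      by_cases hg1 : g = 1
      · simp [hg1]
      · rw [if_neg hg1, if_neg hg1]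
        by_cases hgy : g = y
        · simp [hgy]
        · rw [if_neg hgy, if_neg hgy]
          have hgpos : 0 < g := by
            rw [hg]
            exact_mod_cast Int.gcd_pos_of_ne_zero_left y (by omega)
          have hg2 : 2 ≤ g := by omega
          have hdvd : g ∣ y := Int.gcd_dvd_right x y
          have hgley : g ≤ y := Int.le_of_dvd hyp hdvd
          have hq1 : 1 ≤ y / g := by
            rw [Int.le_ediv_iff_mul_le hgpos]; omega
          have hqlt : y / g < y := pv_ediv_lt_self y g hyp (by omega)
          rw [PySem.Int.floordiv_eq_ediv_of_pos hgpos]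
          exact ih g (y / g) (Or.inr ⟨by omega, hq1⟩) (by omega)

-- ===== VERDICT (by name: the statement is the Claim_ definition above) =====
theorem hasCommonDivisors_spec : Claim_equal_hasCommonDivisors := by
  intro x y _ hpre
  unfold Spec_hasCommonDivisors hasCommonDivisors hasCommonDivisors_alt
  exact hasCD_eq (y.toNat + 1) x y hpre (by omega)
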